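-- pv_equiv track=rewrite | github.com/vanvac/BSCS-coding-competition | BattlevarsV2.py | changeCaseAndRev
-- ===== SOURCE A (Python) =====
-- def convertCamelToSnake(camelStr) -> str:
--   snakeStr = ''
--   for char in camelStr:
--     if char.isupper():
--       snakeStr += '_' + char.lower()
--     else:
--       snakeStr += char
--   return snakeStr
--
-- def convertSnakeToCamel(snakeStr) -> str:
--   camelStr = ''
--   nextCharUpper = False
--   for char in snakeStr:
--     if char == '_':
--       nextCharUpper = True
--       continue
--     elif nextCharUpper:
--       nextCharUpper = False
--       char = char.upper()
--       camelStr += char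
--       continue
--     camelStr += char
--   return camelStr
--
-- def checkIfCamel(var) -> bool:
--   if var.find('_') == -1:
--     return True
--   return False
--
-- def changeCaseAndRev(Listov) -> list:
--   result = []
--   for var in Listov:
--     if checkIfCamel(var):
--       result.append(convertCamelToSnake(var))
--     else:
--       result.append(convertSnakeToCamel(var))
--   result.reverse()
--   return result
-- ===== SOURCE B (Python) =====
-- def changeCaseAndRev(Listov) -> list:
--   result = []
--   for var in reversed(Listov):
--     if '_' in var:
--       parts = var.split('_')
--       converted = parts[0] + ''.join(p[0].upper() + p[1:] for p in parts[1:] if p)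
--     else:
--       converted = ''.join('_' + c.lower() if c.isupper() else c for c in var)
--     result.append(converted)
--   return result
-- ===== Notes on version B (the rewrite author's own statement) =====
-- stated objective: alternative
-- what changed: snake-to-camel is rebuilt by splitting on '_' into segments and rejoining (first segment unchanged, each later nonempty segment with its first char uppercased) instead of A's per-character nextCharUpper flag state machine; camel-to-snake becomes a join over a per-char mapping, and the result is built by iterating the reversed list instead of appending then reversing.
import Mathlib
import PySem

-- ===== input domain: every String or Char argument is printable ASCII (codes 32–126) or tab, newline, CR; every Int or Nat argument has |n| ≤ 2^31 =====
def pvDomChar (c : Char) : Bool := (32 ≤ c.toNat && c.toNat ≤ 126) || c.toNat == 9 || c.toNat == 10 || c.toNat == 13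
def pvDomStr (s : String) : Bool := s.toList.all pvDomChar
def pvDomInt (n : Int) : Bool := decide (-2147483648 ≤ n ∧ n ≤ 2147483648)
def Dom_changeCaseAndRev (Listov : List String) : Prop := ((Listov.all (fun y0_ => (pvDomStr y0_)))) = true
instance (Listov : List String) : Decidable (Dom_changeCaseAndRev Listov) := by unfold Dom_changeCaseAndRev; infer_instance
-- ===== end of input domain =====

-- B rebuilds snake→camel by splitting on '_' into segments (instead of A's per-char flag state machine)
-- and iterates the reversed list instead of reversing at the end; objective: alternative decomposition.

-- ===== PORT A =====
-- for char in camelStr: if char.isupper(): snakeStr += '_' + char.lower() else: snakeStr += char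
def convertCamelToSnake (camelStr : String) : String :=
  String.ofList (camelStr.toList.foldl
    (fun acc c => if PySem.Chars.isupper c then acc ++ ['_', PySem.Chars.lowerChar c] else acc ++ [c]) [])

-- the flag state machine: state = (camelStr so far, nextCharUpper)
def convertSnakeToCamel (snakeStr : String) : String :=
  String.ofList (snakeStr.toList.foldl
    (fun s c =>
      if c = '_' then (s.1, true)
      else if s.2 then (s.1 ++ [PySem.Chars.upperChar c], false)
      else (s.1 ++ [c], false))
    (([] : List Char), false)).1

def checkIfCamel (var : String) : Bool :=
  if PySem.Str.find var "_" = -1 then true else false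

def changeCaseAndRev (Listov : List String) : List String :=
  (Listov.foldl
    (fun result var =>
      if checkIfCamel var then result ++ [convertCamelToSnake var]
      else result ++ [convertSnakeToCamel var])
    []).reverse

-- ===== PORT B =====
-- p[0].upper() + p[1:] for a nonempty segment p
def capSeg (p : List Char) : List Char :=
  match p with
  | [] => []
  | c :: r => PySem.Chars.upperChar c :: r

-- parts[0] + ''.join(p[0].upper() + p[1:] for p in parts[1:] if p)
def snakeToCamelB (cs : List Char) : List Char :=
  let parts := cs.splitOn '_'
  parts.headI ++ ((parts.tail.filter (fun p => !p.isEmpty)).flatMap capSeg)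

-- ''.join('_' + c.lower() if c.isupper() else c for c in var)
def camelToSnakeB (cs : List Char) : List Char :=
  cs.flatMap (fun c => if PySem.Chars.isupper c then ['_', PySem.Chars.lowerChar c] else [c])

def convB (var : String) : String :=
  if PySem.Str.isIn "_" var then String.ofList (snakeToCamelB var.toList)
  else String.ofList (camelToSnakeB var.toList)

def changeCaseAndRev_alt (Listov : List String) : List String :=
  Listov.reverse.foldl (fun result var => result ++ [convB var]) []

-- ===== PRECONDITION & SPEC =====
def Spec_changeCaseAndRev (Listov : List String) (out : List String) : Prop := out = changeCaseAndRev_alt Listov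
instance (Listov : List String) (out : List String) : Decidable (Spec_changeCaseAndRev Listov out) := by unfold Spec_changeCaseAndRev; infer_instance

-- ===== CLAIM (what is proved, stated in full; the proofs are below) =====
def Claim_equal_changeCaseAndRev : Prop := ∀ (Listov : List String), Dom_changeCaseAndRev Listov → Spec_changeCaseAndRev Listov (changeCaseAndRev Listov)

-- ===== LEMMAS AND PROOFS =====

-- camel→snake: A's appending fold is B's flatMap
lemma camel_eq (cs : List Char) (acc : List Char) :
    cs.foldl (fun acc c => if PySem.Chars.isupper c then acc ++ ['_', PySem.Chars.lowerChar c] else acc ++ [c]) acc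
      = acc ++ camelToSnakeB cs := by
  induction cs generalizing acc with
  | nil => simp [camelToSnakeB]
  | cons c t ih =>
    by_cases h : PySem.Chars.isupper c <;>
      simp [camelToSnakeB, List.foldl_cons, h, ih, List.flatMap_cons]

-- the flag-true variant of B's split decomposition: every nonempty segment capitalized
def snakeT (cs : List Char) : List Char :=
  ((cs.splitOn '_').filter (fun p => !p.isEmpty)).flatMap capSeg

lemma splitOn_underscore_cons (t : List Char) :
    ('_' :: t).splitOn '_' = [] :: t.splitOn '_' := by
  simp [List.splitOn, List.splitOnP_cons]

lemma splitOn_other_cons (c : Char) (t : List Char) (h : c ≠ '_') :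
    (c :: t).splitOn '_' = (t.splitOn '_').modifyHead (List.cons c) := by
  simp [List.splitOn, List.splitOnP_cons, h]

-- A's state machine, with either flag, equals B's split decomposition
lemma snake_eq (cs : List Char) (acc : List Char) :
    ((cs.foldl
      (fun s c =>
        if c = '_' then (s.1, true)
        else if s.2 then (s.1 ++ [PySem.Chars.upperChar c], false)
        else (s.1 ++ [c], false))
      (acc, false)).1 = acc ++ snakeToCamelB cs)
    ∧ ((cs.foldl
      (fun s c =>
        if c = '_' then (s.1, true)
        else if s.2 then (s.1 ++ [PySem.Chars.upperChar c], false)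
        else (s.1 ++ [c], false))
      (acc, true)).1 = acc ++ snakeT cs) := by
  induction cs generalizing acc with
  | nil => simp [snakeToCamelB, snakeT]
  | cons c t ih =>
    by_cases h : c = '_'
    · subst h
      constructor <;>
        simp [snakeToCamelB, snakeT, splitOn_underscore_cons, (ih acc).2]
    · obtain ⟨hd, tl, hsplit⟩ : ∃ hd tl, t.splitOn '_' = hd :: tl := by
        cases hs : t.splitOn '_' with
        | nil => exact absurd hs (List.splitOnP_ne_nil _ t)
        | cons hd tl => exact ⟨hd, tl, rfl⟩
      constructor
      · simp only [List.foldl_cons, if_neg h, Bool.false_eq_true, if_false, (ih (acc ++ [c])).1]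
        simp [snakeToCamelB, splitOn_other_cons c t h, hsplit]
      · simp only [List.foldl_cons, if_neg h, if_true, (ih (acc ++ [PySem.Chars.upperChar c])).1]
        simp [snakeT, snakeToCamelB, splitOn_other_cons c t h, hsplit, capSeg]

-- per-string: A's conversion (with A's find-based test) equals B's conversion
lemma conv_eq (var : String) :
    (if checkIfCamel var then convertCamelToSnake var else convertSnakeToCamel var) = convB var := by
  have hiff : checkIfCamel var = !PySem.Chars.isIn ['_'] var.toList := by
    by_cases hx : ['_'] <:+: var.toList
    · have h1 : PySem.Chars.find var.toList ['_'] ≠ -1 := (PySem.Chars.find_ne_neg_one_iff _ _).mpr hx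
      have h2 : PySem.Chars.isIn ['_'] var.toList = true := (PySem.Chars.isIn_iff_infix _ _).mpr hx
      simp [checkIfCamel, h1, h2]
    · have h1 : PySem.Chars.find var.toList ['_'] = -1 := (PySem.Chars.find_eq_neg_one_iff _ _).mpr hx
      have h2 : PySem.Chars.isIn ['_'] var.toList = false := (PySem.Chars.isIn_eq_false_iff _ _).mpr hx
      simp [checkIfCamel, h1, h2]
  rw [hiff]
  unfold convB
  by_cases h : PySem.Chars.isIn ['_'] var.toList
  · simp [h, convertSnakeToCamel, (snake_eq var.toList []).1]
  · simp [h, convertCamelToSnake, camel_eq var.toList []]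

-- A's whole loop equals acc ++ map convB (uses conv_eq per element)
lemma main_fold (l : List String) (acc : List String) :
    l.foldl
      (fun result var =>
        if checkIfCamel var then result ++ [convertCamelToSnake var]
        else result ++ [convertSnakeToCamel var]) acc = acc ++ l.map convB := by
  induction l generalizing acc with
  | nil => simp
  | cons v t ih =>
    have hc := conv_eq v
    by_cases h : checkIfCamel v <;> simp [h] at hc <;>
      simp [List.foldl_cons, h, ih, hc]

-- ===== VERDICT (by name: the statement is the Claim_ definition above) =====
theorem changeCaseAndRev_spec : Claim_equal_changeCaseAndRev := by
  intro Listov _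
  show changeCaseAndRev Listov = changeCaseAndRev_alt Listov
  unfold changeCaseAndRev changeCaseAndRev_alt
  rw [PySem.List.foldl_append_singleton_eq_map convB Listov.reverse [], main_fold Listov []]
  simp [List.map_reverse]
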